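-- pv_equiv track=rewrite | github.com/SekouDiaoNlp/mlconjug3 | utils/unimorph_parser.py | extract_ending
-- ===== SOURCE A (Python) =====
-- def extract_ending(word: str, root: str, lemma: str) -> str:
--     """
--     Extract ending by finding common suffix with lemma
--     """
--     # Find common suffix
--     min_len = min(len(word), len(lemma))
--     common_suffix_len = 0
--     for i in range(1, min_len + 1):
--         if word[-i] == lemma[-i]:
--             common_suffix_len = i
--         else:
--             break
--
--     if common_suffix_len > 0:
--         # If we have a common suffix, the ending is the part after the root
--         # or the whole word if no root
--         if root and len(word) > len(root):
--             return word[len(root):]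
--         else:
--             return word
--     else:
--         return word
-- ===== SOURCE B (Python) =====
-- def extract_ending(word: str, root: str, lemma: str) -> str:
--     """O(1) closed form: A's suffix scan is only used via `common_suffix_len > 0`,
--     which holds exactly when both strings are non-empty and share their last character."""
--     if word and lemma and word[-1] == lemma[-1] and root and len(word) > len(root):
--         return word[len(root):]
--     return word
-- ===== Notes on version B (the rewrite author's own statement) =====
-- stated objective: faster
-- what changed: Replaced the suffix-length scan (whose result is only tested for being > 0) by a single last-character comparison and one guarded slice, removing the loop entirely.
import Mathlib
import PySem

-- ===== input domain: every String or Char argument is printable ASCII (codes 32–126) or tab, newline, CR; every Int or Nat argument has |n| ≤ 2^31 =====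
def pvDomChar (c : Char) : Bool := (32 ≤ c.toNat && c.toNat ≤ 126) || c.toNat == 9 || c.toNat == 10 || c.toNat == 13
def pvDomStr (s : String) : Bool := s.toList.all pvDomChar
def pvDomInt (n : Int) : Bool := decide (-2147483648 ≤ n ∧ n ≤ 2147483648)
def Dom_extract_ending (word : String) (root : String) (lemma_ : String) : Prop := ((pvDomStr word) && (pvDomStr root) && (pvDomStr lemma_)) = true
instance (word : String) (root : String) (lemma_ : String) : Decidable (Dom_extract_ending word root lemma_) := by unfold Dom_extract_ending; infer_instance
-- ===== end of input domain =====

-- B replaces A's suffix-length loop (used only via `> 0`) by a single last-character test: O(1) decision instead of an O(min-length) scan; same return value everywhere.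

-- ===== PORT A =====
-- the `for i in range(1, min_len + 1)` loop with its break, carrying `common_suffix_len` as acc
def aSuffixLoop (w l : List Char) (minLen i acc : Nat) : Nat :=
  if i ≤ minLen then
    if PySem.List.pyGet? w (-(i : Int)) = PySem.List.pyGet? l (-(i : Int)) then
      aSuffixLoop w l minLen (i + 1) i
    else acc
  else acc
termination_by minLen + 1 - i

def extract_ending (word : String) (root : String) (lemma_ : String) : String :=
  let minLen := min word.toList.length lemma_.toList.length
  let commonSuffixLen := aSuffixLoop word.toList lemma_.toList minLen 1 0
  if commonSuffixLen > 0 then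
    if root.toList ≠ [] ∧ word.toList.length > root.toList.length then
      String.ofList (PySem.List.slice word.toList (some (root.toList.length : Int)) none)
    else word
  else word

-- ===== PORT B =====
def extract_ending_alt (word : String) (root : String) (lemma_ : String) : String :=
  if word.toList ≠ [] ∧ lemma_.toList ≠ [] ∧
     PySem.List.pyGet? word.toList (-1) = PySem.List.pyGet? lemma_.toList (-1) ∧
     root.toList ≠ [] ∧ root.toList.length < word.toList.length then
    String.ofList (PySem.List.slice word.toList (some (root.toList.length : Int)) none)
  else word

-- ===== PRECONDITION & SPEC =====
def Spec_extract_ending (word : String) (root : String) (lemma_ : String) (out : String) : Prop := out = extract_ending_alt word root lemma_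
instance (word : String) (root : String) (lemma_ : String) (out : String) : Decidable (Spec_extract_ending word root lemma_ out) := by unfold Spec_extract_ending; infer_instance

-- ===== CLAIM (what is proved, stated in full; the proofs are below) =====
def Claim_equal_extract_ending : Prop := ∀ (word : String) (root : String) (lemma_ : String), Dom_extract_ending word root lemma_ → Spec_extract_ending word root lemma_ (extract_ending word root lemma_)

-- ===== LEMMAS AND PROOFS =====

-- started with i ≥ 1 and acc ≥ 1, the loop's result stays ≥ 1 (acc is only overwritten by i)
theorem aSuffixLoop_pos (w l : List Char) (m i acc : Nat) :
    1 ≤ i → 1 ≤ acc → 1 ≤ aSuffixLoop w l m i acc := by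
  fun_induction aSuffixLoop w l m i acc with
  | case1 i acc h heq ih => intro hi _; exact ih (by omega) hi
  | case2 => intro _ ha; exact ha
  | case3 => intro _ ha; exact ha

-- the loop's result is positive exactly when the first iteration succeeds
theorem aSuffixLoop_pos_iff (w l : List Char) (minLen : Nat) :
    0 < aSuffixLoop w l minLen 1 0 ↔
      (1 ≤ minLen ∧ PySem.List.pyGet? w (-1) = PySem.List.pyGet? l (-1)) := by
  rw [aSuffixLoop]
  simp only [Nat.cast_one]
  split_ifs with h1 h2
  · have h := aSuffixLoop_pos w l minLen (1+1) 1 (by omega) (by omega)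
    constructor
    · intro _; exact ⟨h1, h2⟩
    · intro _; omega
  · simp only [Nat.lt_irrefl, false_iff, not_and]
    intro _; exact h2
  · simp only [Nat.lt_irrefl, false_iff, not_and]
    intro h; exact absurd h h1

-- ===== VERDICT (by name: the statement is the Claim_ definition above) =====
theorem extract_ending_spec : Claim_equal_extract_ending := by
  intro word root lemma_ _
  unfold Spec_extract_ending extract_ending extract_ending_alt
  simp only [gt_iff_lt, aSuffixLoop_pos_iff]
  by_cases hw : word.toList = [] <;> by_cases hl : lemma_.toList = [] <;>
    by_cases hr : root.toList = [] <;>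
    by_cases hlen : root.toList.length < word.toList.length <;>
    by_cases hc : PySem.List.pyGet? word.toList (-1) = PySem.List.pyGet? lemma_.toList (-1) <;>
    simp_all
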